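-- pv_equiv track=rewrite | github.com/Akunor/freecodecamp | daily-challenges/2026.02.28 Challenge.py | add_punctuation
-- ===== SOURCE A (Python) =====
-- def add_punctuation(sentences):
--     listed = sentences.split()
--     final = listed[0]
--     for word in listed[1:]:
--         if word[0].isupper():
--             final += '. '
--             final += word
--         else:
--             final += ' '
--             final += word
--
--     final += '.'
--
--     return final
-- ===== SOURCE B (Python) =====
-- def add_punctuation(sentences):
--     words = sentences.split()
--     segments = []
--     for w in words:
--         if not segments or w[0].isupper():
--             segments.append([w])
--         else:
--             segments[-1].append(w)
--     return '. '.join(' '.join(s) for s in segments) + '.'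
-- ===== Notes on version B (the rewrite author's own statement) =====
-- stated objective: alternative
-- what changed: B partitions the words into sentence segments (a new segment at the start and at every capitalized word) and then joins the segments with '. ' and the words inside each with ' ', instead of A's single accumulator with a per-word separator branch.
import Mathlib
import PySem

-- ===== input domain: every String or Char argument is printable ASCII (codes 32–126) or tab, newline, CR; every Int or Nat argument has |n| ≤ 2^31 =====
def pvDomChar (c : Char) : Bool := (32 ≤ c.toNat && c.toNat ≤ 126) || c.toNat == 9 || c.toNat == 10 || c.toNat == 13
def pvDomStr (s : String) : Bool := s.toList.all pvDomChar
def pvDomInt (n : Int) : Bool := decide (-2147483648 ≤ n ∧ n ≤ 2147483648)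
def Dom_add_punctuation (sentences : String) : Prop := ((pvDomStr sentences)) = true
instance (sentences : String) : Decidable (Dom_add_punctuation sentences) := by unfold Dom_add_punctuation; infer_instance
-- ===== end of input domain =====

-- B partitions the words into capital-started segments and joins them, instead of A's
-- single accumulator with a per-word separator branch; objective: alternative decomposition.


-- word[0].isupper() (shared by both Pythons; split words are never empty, so pyGet? is some)
def pvCap (w : List Char) : Bool := (PySem.List.pyGet? w 0).any PySem.Chars.isupper

-- ===== PORT A =====
def add_punctuation (sentences : String) : String :=
  let listed := PySem.Chars.split₀ sentences.toList
  match listed with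
  | [] => ""  -- listed[0] raises IndexError in Python; excluded by Pre_
  | first :: rest =>
    String.mk
      ((rest.foldl (fun final word =>
          if pvCap word then final ++ ('.' :: ' ' :: word)
          else final ++ (' ' :: word)) first) ++ ['.'])

-- ===== PORT B =====
-- segments[-1].append(w): extend the last segment
def pvAppendLast (segs : List (List (List Char))) (w : List Char) : List (List (List Char)) :=
  match segs with
  | [] => []
  | [s] => [s ++ [w]]
  | s :: rest => s :: pvAppendLast rest w

def add_punctuation_alt (sentences : String) : String :=
  let words := PySem.Chars.split₀ sentences.toList
  let segments := words.foldl (fun segs w =>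
      if segs.isEmpty || pvCap w then segs ++ [[w]]
      else pvAppendLast segs w) []
  String.mk
    (PySem.Chars.join ['.', ' '] (segments.map (PySem.Chars.join [' '])) ++ ['.'])

-- ===== PRECONDITION & SPEC =====
-- Pre_ excludes exactly the inputs with no words (empty or all-whitespace), on which A's
-- 'listed[0]' raises IndexError.
def Pre_add_punctuation (sentences : String) : Prop :=
  PySem.Chars.split₀ sentences.toList ≠ []
instance (sentences : String) : Decidable (Pre_add_punctuation sentences) := by
  unfold Pre_add_punctuation; infer_instance

def pvWitness_add_punctuation : String := "hi there You rock"

def Spec_add_punctuation (sentences : String) (out : String) : Prop :=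
  out = add_punctuation_alt sentences
instance (sentences : String) (out : String) : Decidable (Spec_add_punctuation sentences out) := by
  unfold Spec_add_punctuation; infer_instance

-- ===== CLAIM (what is proved, stated in full; the proofs are below) =====
def Claim_equal_add_punctuation : Prop := ∀ (sentences : String), Dom_add_punctuation sentences → Pre_add_punctuation sentences → Spec_add_punctuation sentences (add_punctuation sentences)

-- ===== LEMMAS AND PROOFS =====

-- joining one more piece onto a nonempty list of pieces
theorem pvJoin_append (sep p : List Char) :
    ∀ (ps : List (List Char)), ps ≠ [] →
      PySem.Chars.join sep (ps ++ [p]) = PySem.Chars.join sep ps ++ sep ++ p := by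
  intro ps
  induction ps with
  | nil => intro h; exact absurd rfl h
  | cons q qs ih =>
    intro _
    cases qs with
    | nil => simp [PySem.Chars.join_cons_cons, PySem.Chars.join_singleton]
    | cons r rs =>
      have := ih (by simp)
      simp only [List.cons_append, PySem.Chars.join_cons_cons, List.cons_append] at this ⊢
      rw [this]; simp

def pvRender (segs : List (List (List Char))) : List Char :=
  PySem.Chars.join ['.', ' '] (segs.map (PySem.Chars.join [' ']))

theorem pvAppendLast_ne_nil (segs : List (List (List Char))) (w : List Char)
    (h : segs ≠ []) : pvAppendLast segs w ≠ [] := by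
  cases segs with
  | nil => exact absurd rfl h
  | cons s rest => cases rest <;> simp [pvAppendLast]

theorem pvRender_appendLast (segs : List (List (List Char))) (w : List Char)
    (hne : segs ≠ []) (hall : ∀ s ∈ segs, s ≠ []) :
    pvRender (pvAppendLast segs w) = pvRender segs ++ (' ' :: w) := by
  induction segs with
  | nil => exact absurd rfl hne
  | cons s rest ih =>
    cases rest with
    | nil =>
      have hs : s ≠ [] := hall s (by simp)
      simp only [pvAppendLast, pvRender, List.map_cons, List.map_nil,
        PySem.Chars.join_singleton]
      rw [pvJoin_append [' '] w s hs]; simp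
    | cons t ts =>
      have hne' : (t :: ts : List (List (List Char))) ≠ [] := by simp
      have hall' : ∀ x ∈ t :: ts, x ≠ [] := fun x hx => hall x (by simp [hx])
      have := ih hne' hall'
      simp only [pvAppendLast, pvRender, List.map_cons] at this ⊢
      cases h2 : pvAppendLast (t :: ts) w with
      | nil => exact absurd h2 (pvAppendLast_ne_nil _ _ (by simp))
      | cons u us =>
        rw [h2] at this
        simp only [List.map_cons, PySem.Chars.join_cons_cons] at this ⊢
        rw [this]
        cases ts <;> simp [PySem.Chars.join_cons_cons]

theorem pvRender_push (segs : List (List (List Char))) (w : List Char)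
    (hne : segs ≠ []) :
    pvRender (segs ++ [[w]]) = pvRender segs ++ ('.' :: ' ' :: w) := by
  unfold pvRender
  rw [List.map_append]
  simp only [List.map_cons, List.map_nil, PySem.Chars.join_singleton]
  rw [pvJoin_append ['.', ' '] w (segs.map (PySem.Chars.join [' ']))
      (by simpa using hne)]
  simp

theorem pvAppendLast_all_ne (segs : List (List (List Char))) (w : List Char)
    (hall : ∀ s ∈ segs, s ≠ []) : ∀ s ∈ pvAppendLast segs w, s ≠ [] := by
  induction segs with
  | nil => simp [pvAppendLast]
  | cons s rest ih =>
    cases rest with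
    | nil =>
      intro x hx
      simp [pvAppendLast] at hx
      subst hx; simp
    | cons t ts =>
      intro x hx
      simp only [pvAppendLast] at hx
      rcases List.mem_cons.mp hx with h | h
      · subst h; exact hall x (by simp)
      · exact ih (fun y hy => hall y (by simp [hy])) x h

theorem pvFold_render (rest : List (List Char)) :
    ∀ (segs : List (List (List Char))), segs ≠ [] → (∀ s ∈ segs, s ≠ []) →
      pvRender (rest.foldl (fun segs w =>
          if segs.isEmpty || pvCap w then segs ++ [[w]]
          else pvAppendLast segs w) segs)
        = rest.foldl (fun final word =>
            if pvCap word then final ++ ('.' :: ' ' :: word)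
            else final ++ (' ' :: word)) (pvRender segs) := by
  induction rest with
  | nil => intro segs _ _; rfl
  | cons w ws ih =>
    intro segs hne hall
    have hempty : segs.isEmpty = false := by
      cases segs with
      | nil => exact absurd rfl hne
      | cons _ _ => rfl
    simp only [List.foldl_cons, hempty, Bool.false_or]
    by_cases hc : pvCap w
    · simp only [hc, if_true]
      rw [ih (segs ++ [[w]]) (by simp) (by
        intro s hs
        rcases List.mem_append.mp hs with h | h
        · exact hall s h
        · simp at h; subst h; simp)]
      rw [pvRender_push segs w hne]
    · simp only [hc, if_false, Bool.false_eq_true]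
      rw [ih (pvAppendLast segs w) (pvAppendLast_ne_nil segs w hne)
        (pvAppendLast_all_ne segs w hall)]
      rw [pvRender_appendLast segs w hne hall]

-- ===== VERDICT (by name: the statement is the Claim_ definition above) =====
theorem add_punctuation_spec : Claim_equal_add_punctuation := by
  intro s _ hpre
  unfold Spec_add_punctuation add_punctuation add_punctuation_alt
  cases h : PySem.Chars.split₀ s.toList with
  | nil => exact absurd h hpre
  | cons first rest =>
    simp only [List.foldl_cons, List.isEmpty_nil, Bool.true_or, if_true,
      List.nil_append]
    have := pvFold_render rest [[first]] (by simp) (by simp)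
    unfold pvRender at this
    simp only [List.map_cons, List.map_nil, PySem.Chars.join_singleton] at this
    rw [this]
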